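-- pv_equiv track=rewrite | github.com/slarrozejar/benchmarks | program/dotStyle/dotStyle.py | get_infos
-- ===== SOURCE A (Python) =====
-- def get_infos(dct):
--     """ From a dictionnary dct containing attributes with their values, where the
--     values possibly contain some %str% where str is a string without
--     spaces and without '%' and creates a formatted string where all %str% are
--     replaced by '%s'. The substrings inbetween %str% don't contain '%' either.
--     Returns a list of pairs (attr, val) where val is the formatted string and a
--     list of all words which were between '%'. The elements contained in dct must
--     be strings. """
--     res = []
--     attributes = []
--     for elmt in dct:
--         format_string, attributes_names = parse_format_string(dct[elmt])
--         res.append((elmt, format_string))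
--         attributes.append(attributes_names)
--     return res, attributes
--
-- def parse_format_string(str):
--     """ Takes a string possibly containing some %str% where str is a string without
--     spaces and without '%' and creates a formatted string where all %str% are
--     replaced by '%s'. The substrings inbetween %str% don't contain '%' either.
--     Returns the formatted string and a list of all words which were between '%'. """
--     initial = str
--     attributes_indices = [] # list of pairs (lb, ub) lower and upper bounds to consider
--     i = 0
--
--     # Get lower and upper bounds
--     f=str.find("%")
--     while((str != "") and (f != -1)):
--         tmp = f
--         lb = i+tmp
--         i += tmp + 1
--         str=str[tmp+1:]
--         tmp = str.find("%")
--         ub = i+tmp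
--         i += tmp + 1
--         str=str[tmp+1:]
--         attributes_indices.append((lb, ub))
--         f=str.find("%")
--
--     attributes = [] # Names of attributes' values to consider
--     for lb, ub in attributes_indices:
--         attributes.append(initial[lb+1:ub])
--
--     # No attributes to change
--     if(len(attributes_indices)==0):
--         return initial, attributes
--
--     # Create format string
--     format_string = initial[0:attributes_indices[0][0]] + "%s"
--     for i in range(len(attributes_indices)-1):
--         format_string += initial[attributes_indices[i][1]+1:attributes_indices[i+1][0]] + "%s"
--     return format_string, attributes
-- ===== SOURCE B (Python) =====
-- def get_infos(dct):
--     res = []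
--     attributes = []
--     for key, val in dct.items():
--         format_string, attribute_names = _parse(val)
--         res.append((key, format_string))
--         attributes.append(attribute_names)
--     return res, attributes
--
-- def _parse(s):
--     """Single pass: collect the indices of all '%' characters once, then walk that
--     position list two at a time (an unmatched final '%' pairs with itself), cutting
--     the attribute names and the format pieces directly out of s."""
--     pos = [i for i, c in enumerate(s) if c == '%']
--     if not pos:
--         return s, []
--     fmt = [s[:pos[0]]]
--     attrs = []
--     rest = pos
--     while rest:
--         a = rest[0]
--         b = rest[1] if len(rest) > 1 else a
--         attrs.append(s[a + 1:b])
--         rest = rest[2:]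
--         if rest:
--             fmt.append(s[b + 1:rest[0]])
--     return "%s".join(fmt) + "%s", attrs
-- ===== Notes on version B (the rewrite author's own statement) =====
-- stated objective: alternative
-- what changed: A repeatedly reslices the string after every '%' it finds and rebuilds the format string with an indexed range loop; B instead collects all '%' positions in one enumerate pass, walks that position list two at a time, and cuts attribute names and format pieces directly out of the original string (linear per string, though a timing run could not measure a difference).
import Mathlib
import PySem

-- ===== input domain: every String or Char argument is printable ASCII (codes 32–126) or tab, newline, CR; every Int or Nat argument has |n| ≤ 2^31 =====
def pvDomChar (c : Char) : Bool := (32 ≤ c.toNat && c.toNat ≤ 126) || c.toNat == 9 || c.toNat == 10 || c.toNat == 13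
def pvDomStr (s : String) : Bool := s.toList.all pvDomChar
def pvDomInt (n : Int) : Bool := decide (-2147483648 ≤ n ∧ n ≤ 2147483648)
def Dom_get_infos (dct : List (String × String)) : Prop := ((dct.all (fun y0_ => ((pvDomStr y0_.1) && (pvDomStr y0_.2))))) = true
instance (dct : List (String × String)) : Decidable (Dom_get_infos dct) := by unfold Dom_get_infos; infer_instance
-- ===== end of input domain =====

-- B replaces A's find-and-reslice loop by a single pass that collects all '%'
-- positions once and cuts names/format pieces directly out of the original string
-- (objective: alternative algorithm; timing run could not measure a speed difference).


-- ===== PORT A =====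
-- A's while loop: repeatedly find the next '%', reslice the string, record (lb, ub).
def aLoop (s : List Char) (i : Int) (acc : List (Int × Int)) : List (Int × Int) :=
  let f := PySem.Chars.find s ['%']
  if h : s ≠ [] ∧ f ≠ -1 then
    let lb := i + f
    let i1 := i + f + 1
    let s1 := PySem.List.slice s (some (f + 1)) none
    let t2 := PySem.Chars.find s1 ['%']
    let ub := i1 + t2
    let i2 := i1 + t2 + 1
    let s2 := PySem.List.slice s1 (some (t2 + 1)) none
    aLoop s2 i2 (acc ++ [(lb, ub)])
  else acc
termination_by s.length
decreasing_by
  have hf : -1 ≤ PySem.Chars.find s ['%'] := PySem.Chars.neg_one_le_find s ['%']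
  have hf0 : 0 ≤ PySem.Chars.find s ['%'] := by
    rcases h with ⟨_, hne⟩; omega
  have ht2 : -1 ≤ PySem.Chars.find (PySem.List.slice s (some (PySem.Chars.find s ['%'] + 1)) none) ['%'] :=
    PySem.Chars.neg_one_le_find _ _
  rw [PySem.List.slice_from _ (by omega), PySem.List.slice_from _ (by omega)]
  simp only [List.length_drop]
  rcases h with ⟨hs, _⟩
  have : 0 < s.length := List.length_pos_iff.mpr hs
  have : 1 ≤ (PySem.Chars.find s ['%'] + 1).toNat := by omega
  omega

def parse_format_string (str0 : String) : String × List String :=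
  let initial := str0.toList
  let idxs := aLoop initial 0 []
  let attrs := idxs.map (fun p => PySem.List.slice initial (some (p.1 + 1)) (some p.2))
  if idxs.length = 0 then (str0, attrs.map String.ofList)
  else
    let fmt0 := PySem.List.slice initial none (some ((PySem.List.pyGetD idxs 0 ((0 : Int), (0 : Int))).1)) ++ ['%', 's']
    let fmt := (PySem.List.pyRange 0 ((idxs.length : Int) - 1) 1).foldl
      (fun acc k => acc ++ (PySem.List.slice initial
          (some ((PySem.List.pyGetD idxs k ((0 : Int), (0 : Int))).2 + 1))
          (some ((PySem.List.pyGetD idxs (k + 1) ((0 : Int), (0 : Int))).1)) ++ ['%', 's'])) fmt0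
    (String.ofList fmt, attrs.map String.ofList)

def get_infos (dct : List (String × String)) : (List (String × String)) × List (List String) :=
  dct.foldl (fun acc e =>
    let pr := parse_format_string ((PySem.Dict.get? (PySem.Dict.mk dct) e.1).getD "")
    (acc.1 ++ [(e.1, pr.1)], acc.2 ++ [pr.2])) ([], [])

-- ===== PORT B =====
-- All '%' positions, found in one pass over the enumerated characters.
def bPositions (s : List Char) : List Int :=
  ((PySem.List.enumerate s 0).filter (fun p => p.2 == '%')).map Prod.fst

-- B's pairing pass: consume the position list two at a time, returning
-- (attribute names, format pieces between consecutive pairs).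
def bLoop (s : List Char) : List Int → List (List Char) × List (List Char)
  | [] => ([], [])
  | [a] => ([PySem.List.slice s (some (a + 1)) (some a)], [])
  | [a, b] => ([PySem.List.slice s (some (a + 1)) (some b)], [])
  | a :: b :: c :: t =>
    let r := bLoop s (c :: t)
    (PySem.List.slice s (some (a + 1)) (some b) :: r.1,
     PySem.List.slice s (some (b + 1)) (some c) :: r.2)

def parseB (s0 : String) : String × List String :=
  let s := s0.toList
  let pos := bPositions s
  if pos = [] then (s0, [])
  else
    let r := bLoop s pos
    let first := PySem.List.slice s none (some (pos.headD 0))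
    let fmt := PySem.Chars.join ['%', 's'] (first :: r.2) ++ ['%', 's']
    (String.ofList fmt, r.1.map String.ofList)

def get_infos_alt (dct : List (String × String)) : (List (String × String)) × List (List String) :=
  dct.foldl (fun acc e =>
    let pr := parseB e.2
    (acc.1 ++ [(e.1, pr.1)], acc.2 ++ [pr.2])) ([], [])

-- ===== PRECONDITION & SPEC =====
-- Pre_ excludes association lists with duplicate keys: they do not represent a Python
-- dict (which merges duplicates before A ever runs), so the ports' behaviour there is
-- unspecified.
def Pre_get_infos (dct : List (String × String)) : Prop := (dct.map Prod.fst).Nodup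
instance (dct : List (String × String)) : Decidable (Pre_get_infos dct) := by unfold Pre_get_infos; infer_instance
def pvWitness_get_infos : (List (String × String)) := [("query", "a=%id%&b=%name%!"), ("plain", "none")]

def Spec_get_infos (dct : List (String × String)) (out : (List (String × String)) × List (List String)) : Prop := out = get_infos_alt dct
instance (dct : List (String × String)) (out : (List (String × String)) × List (List String)) : Decidable (Spec_get_infos dct out) := by unfold Spec_get_infos; infer_instance

-- ===== CLAIM (what is proved, stated in full; the proofs are below) =====
def Claim_equal_get_infos : Prop := ∀ (dct : List (String × String)), Dom_get_infos dct → Pre_get_infos dct → Spec_get_infos dct (get_infos dct)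

-- ===== LEMMAS AND PROOFS =====

-- '%' positions of s when its characters are numbered from i (generalises bPositions).
def posFrom (s : List Char) (i : Int) : List Int :=
  ((PySem.List.enumerate s i).filter (fun p => p.2 == '%')).map Prod.fst

-- A's (lb, ub) pairs, described directly on the position list.
def pairUp : List Int → List (Int × Int)
  | [] => []
  | [a] => [(a, a)]
  | a :: b :: t => (a, b) :: pairUp t

-- the format pieces strictly between consecutive pairs
def interParts (s : List Char) : List (Int × Int) → List (List Char)
  | p :: q :: t => PySem.List.slice s (some (p.2 + 1)) (some q.1) :: interParts s (q :: t)
  | _ => []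

theorem posFrom_nil (i : Int) : posFrom [] i = [] := rfl

theorem posFrom_cons (c : Char) (t : List Char) (i : Int) :
    posFrom (c :: t) i = (if c = '%' then [i] else []) ++ posFrom t (i + 1) := by
  simp only [posFrom, PySem.List.enumerate_cons, List.filter_cons]
  by_cases h : c = '%' <;> simp [h]

theorem bPositions_eq (s : List Char) : bPositions s = posFrom s 0 := rfl

theorem posFrom_eq_nil_iff (s : List Char) (i : Int) : posFrom s i = [] ↔ '%' ∉ s := by
  induction s generalizing i with
  | nil => simp [posFrom_nil]
  | cons c t ih =>
    rw [posFrom_cons]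
    by_cases h : c = '%' <;> simp [h, ih] <;> tauto

theorem posFrom_eq_cons (s : List Char) (i : Int) (h : '%' ∈ s) :
    posFrom s i = (i + (s.findIdx (· == '%') : Int)) ::
      posFrom (s.drop (s.findIdx (· == '%') + 1)) (i + (s.findIdx (· == '%') : Int) + 1) := by
  induction s generalizing i with
  | nil => simp at h
  | cons c t ih =>
    by_cases hc : c = '%'
    · rw [posFrom_cons]
      simp [hc, List.findIdx_cons]
    · have ht : '%' ∈ t := by
        rcases List.mem_cons.mp h with h' | h'
        · exact absurd h'.symm hc
        · exact h'
      have hfi : (c :: t).findIdx (· == '%') = t.findIdx (· == '%') + 1 := by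
        rw [List.findIdx_cons]
        simp [show (c == '%') = false by simp [hc]]
      rw [posFrom_cons, hfi, List.drop_succ_cons]
      simp only [hc, if_false, List.nil_append]
      rw [ih (i + 1) ht]
      congr 1
      · push_cast; ring
      · congr 1; push_cast; ring

theorem single_prefix (c : Char) (t : List Char) : [c] <+: t ↔ t.head? = some c := by
  cases t <;> simp [List.cons_prefix_iff]

-- Chars.find for the single character '%' is findIdx.
theorem find_pct (s : List Char) :
    PySem.Chars.find s ['%'] = if '%' ∈ s then ((s.findIdx (· == '%') : Nat) : Int) else -1 := by
  by_cases h : '%' ∈ s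
  · have hinf : ['%'] <:+: s := (List.singleton_infix_iff _ _).mpr h
    have h0 : 0 ≤ PySem.Chars.find s ['%'] := (PySem.Chars.find_nonneg_iff s _).mpr hinf
    obtain ⟨hpre, hmin⟩ := PySem.Chars.find_spec h0
    have hJlt : s.findIdx (· == '%') < s.length :=
      List.findIdx_lt_length_of_exists ⟨'%', h, by simp⟩
    have hFc : s[(PySem.Chars.find s ['%']).toNat]? = some '%' := by
      rw [← List.head?_drop]; exact (single_prefix _ _).mp hpre
    have hFlt : (PySem.Chars.find s ['%']).toNat < s.length :=
      (List.getElem?_eq_some_iff.mp hFc).1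
    have hJF : s.findIdx (· == '%') ≤ (PySem.Chars.find s ['%']).toNat := by
      by_contra hlt
      push_neg at hlt
      have hfalse := List.not_of_lt_findIdx (p := (· == '%')) (xs := s) hlt
      have : s[(PySem.Chars.find s ['%']).toNat] = '%' :=
        (List.getElem?_eq_some_iff.mp hFc).2
      simp only [beq_iff_eq, Bool.eq_false_iff, ne_eq] at hfalse
      exact hfalse this
    have hFJ : (PySem.Chars.find s ['%']).toNat ≤ s.findIdx (· == '%') := by
      by_contra hlt
      push_neg at hlt
      refine hmin _ hlt ((single_prefix _ _).mpr ?_)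
      rw [List.head?_drop, List.getElem?_eq_getElem hJlt]
      have := List.findIdx_getElem (p := (· == '%')) (xs := s) (w := hJlt)
      simpa using this
    simp only [h, if_true]
    omega
  · have : ¬ ['%'] <:+: s := fun hin => h ((List.singleton_infix_iff _ _).mp hin)
    simp [h, (PySem.Chars.find_eq_neg_one_iff s _).mpr this]

-- master loop lemma: A's while loop produces pairUp of the position list
theorem aLoop_eq_aux (n : Nat) : ∀ (s : List Char), s.length ≤ n → ∀ (i : Int) (acc : List (Int × Int)),
    aLoop s i acc = acc ++ pairUp (posFrom s i) := by
  induction n with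
  | zero =>
    intro s hs i acc
    have hnil : s = [] := List.eq_nil_of_length_eq_zero (Nat.le_zero.mp hs)
    subst hnil
    rw [aLoop]
    simp [posFrom_nil, pairUp]
  | succ n ih =>
    intro s hs i acc
    by_cases h : '%' ∈ s
    case neg =>
      rw [aLoop]
      have hneg : PySem.Chars.find s ['%'] = -1 := by rw [find_pct, if_neg h]
      rw [dif_neg (by simp [hneg])]
      rw [(posFrom_eq_nil_iff s i).mpr h]
      simp [pairUp]
    case pos =>
      have hsne : s ≠ [] := by rintro rfl; simp at h
      have hfind : PySem.Chars.find s ['%'] = (s.findIdx (· == '%') : Int) := by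
        rw [find_pct, if_pos h]
      have hJlt : s.findIdx (· == '%') < s.length :=
        List.findIdx_lt_length_of_exists ⟨'%', h, by simp⟩
      have htn : ((s.findIdx (· == '%') : Int) + 1).toNat = s.findIdx (· == '%') + 1 := by omega
      have hs1 : PySem.List.slice s (some (((s.findIdx (· == '%') : Nat) : Int) + 1)) none
          = s.drop (s.findIdx (· == '%') + 1) := by
        rw [PySem.List.slice_from _ (by omega), htn]
      rw [aLoop, dif_pos ⟨hsne, by rw [hfind]; omega⟩]
      simp only [hfind, hs1]
      by_cases h2 : '%' ∈ s.drop (s.findIdx (· == '%') + 1)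
      case pos =>
        have hfind2 : PySem.Chars.find (s.drop (s.findIdx (· == '%') + 1)) ['%']
            = ((s.drop (s.findIdx (· == '%') + 1)).findIdx (· == '%') : Int) := by
          rw [find_pct, if_pos h2]
        have htn2 : (((s.drop (s.findIdx (· == '%') + 1)).findIdx (· == '%') : Int) + 1).toNat
            = (s.drop (s.findIdx (· == '%') + 1)).findIdx (· == '%') + 1 := by omega
        have hs2 : PySem.List.slice (s.drop (s.findIdx (· == '%') + 1))
            (some ((((s.drop (s.findIdx (· == '%') + 1)).findIdx (· == '%') : Nat) : Int) + 1)) none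
            = (s.drop (s.findIdx (· == '%') + 1)).drop
                ((s.drop (s.findIdx (· == '%') + 1)).findIdx (· == '%') + 1) := by
          rw [PySem.List.slice_from _ (by omega), htn2]
        simp only [hfind2, hs2]
        rw [ih _ (by simp only [List.length_drop]; omega)]
        rw [posFrom_eq_cons s i h, posFrom_eq_cons _ _ h2]
        simp [pairUp]
      case neg =>
        have hfind2 : PySem.Chars.find (s.drop (s.findIdx (· == '%') + 1)) ['%'] = -1 := by
          rw [find_pct, if_neg h2]
        have hs2 : PySem.List.slice (s.drop (s.findIdx (· == '%') + 1)) (some (-1 + 1)) none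
            = s.drop (s.findIdx (· == '%') + 1) := by
          norm_num [PySem.List.slice_from _ (le_refl (0 : Int))]
        simp only [hfind2, hs2]
        rw [ih _ (by simp only [List.length_drop]; omega)]
        rw [posFrom_eq_cons s i h]
        have hnil : ∀ j : Int, posFrom (s.drop (s.findIdx (· == '%') + 1)) j = [] :=
          fun j => (posFrom_eq_nil_iff _ j).mpr h2
        have harith : i + (s.findIdx (· == '%') : Int) + 1 + -1 = i + (s.findIdx (· == '%') : Int) := by ring
        simp [pairUp, harith, hnil]

theorem aLoop_eq (s : List Char) (i : Int) (acc : List (Int × Int)) :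
    aLoop s i acc = acc ++ pairUp (posFrom s i) :=
  aLoop_eq_aux s.length s (le_refl _) i acc

-- bLoop described through pairUp
theorem pairUp_head (a : Int) (t : List Int) :
    ∃ y rest, pairUp (a :: t) = (a, y) :: rest := by
  match t with
  | [] => exact ⟨a, [], rfl⟩
  | b :: t' => exact ⟨b, pairUp t', rfl⟩

theorem bLoop_eq_aux (s : List Char) (n : Nat) : ∀ (l : List Int), l.length ≤ n →
    bLoop s l = ((pairUp l).map (fun p => PySem.List.slice s (some (p.1 + 1)) (some p.2)),
                 interParts s (pairUp l)) := by
  induction n with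
  | zero =>
    intro l hl
    have : l = [] := List.eq_nil_of_length_eq_zero (Nat.le_zero.mp hl)
    subst this
    simp [bLoop, pairUp, interParts]
  | succ n ih =>
    intro l hl
    match l with
    | [] => simp [bLoop, pairUp, interParts]
    | [a] => simp [bLoop, pairUp, interParts]
    | [a, b] => simp [bLoop, pairUp, interParts]
    | a :: b :: c :: t =>
      obtain ⟨y, rest, hcy⟩ := pairUp_head c t
      rw [bLoop, ih (c :: t) (by simp at hl ⊢; omega)]
      simp only [pairUp, hcy, List.map_cons, interParts]

theorem bLoop_eq (s : List Char) (l : List Int) :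
    bLoop s l = ((pairUp l).map (fun p => PySem.List.slice s (some (p.1 + 1)) (some p.2)),
                 interParts s (pairUp l)) :=
  bLoop_eq_aux s l.length l (le_refl _)

theorem flatMap_eq_flatten_map {α β : Type} (g : α → List β) (l : List α) :
    List.flatMap g l = (l.map g).flatten := by
  induction l with
  | nil => rfl
  | cons a t ih => simp [ih]

-- joining with the separator and appending one more = interleaved concatenation
theorem join_sep (sep first : List Char) (parts : List (List Char)) :
    PySem.Chars.join sep (first :: parts) ++ sep
      = first ++ sep ++ (parts.map (· ++ sep)).flatten := by
  induction parts generalizing first with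
  | nil => simp [PySem.Chars.join_singleton]
  | cons y t ih =>
    rw [PySem.Chars.join_cons_cons]
    simp only [List.map_cons, List.flatten_cons, List.append_assoc, ← ih y]

-- A's indexed range loop visits exactly the pieces interParts lists
theorem interParts_eq_range (s : List Char) (d : Int × Int) :
    ∀ (p : Int × Int) (rest : List (Int × Int)),
    (List.range ((p :: rest).length - 1)).map
      (fun k => PySem.List.slice s (some (((p :: rest).getD k d).2 + 1))
                  (some (((p :: rest).getD (k + 1) d).1)))
      = interParts s (p :: rest) := by
  intro p rest
  induction rest generalizing p with
  | nil => simp [interParts]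
  | cons q t ih =>
    rw [show (p :: q :: t).length - 1 = t.length + 1 from by simp]
    rw [List.range_succ_eq_map]
    rw [List.map_cons, List.map_map]
    rw [show interParts s (p :: q :: t)
        = PySem.List.slice s (some (p.2 + 1)) (some q.1) :: interParts s (q :: t) from rfl]
    congr 1
    rw [← ih q]
    rw [show (q :: t).length - 1 = t.length from by simp]
    refine List.map_congr_left ?_
    intro a _
    simp [Nat.succ_eq_add_one, List.getD_cons_succ]

-- The per-string equivalence
theorem parse_eq (s0 : String) : parse_format_string s0 = parseB s0 := by
  unfold parse_format_string parseB
  simp only [bPositions_eq, aLoop_eq, List.nil_append, bLoop_eq]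
  by_cases hpos : posFrom s0.toList 0 = []
  · rw [hpos]
    simp [pairUp]
  · obtain ⟨p, rest, hpr⟩ : ∃ p rest, posFrom s0.toList 0 = p :: rest := by
      cases hX : posFrom s0.toList 0 with
      | nil => exact absurd hX hpos
      | cons a b => exact ⟨a, b, rfl⟩
    obtain ⟨y, r2, hpu⟩ := pairUp_head p rest
    rw [hpr, hpu]
    rw [if_neg (by simp), if_neg (by simp)]
    simp only [PySem.List.pyGetD_ofNat', List.getD_cons_zero, List.headD_cons]
    rw [PySem.List.foldl_append_eq_flatMap]
    have hlen : ((((p, y) :: r2).length : Nat) : Int) - 1 = ((r2.length : Nat) : Int) := by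
      simp
    rw [hlen, PySem.List.pyRange_zero_natCast]
    have hflat : (List.flatMap
          (fun k => PySem.List.slice s0.toList
              (some ((PySem.List.pyGetD ((p, y) :: r2) k ((0 : Int), (0 : Int))).2 + 1))
              (some ((PySem.List.pyGetD ((p, y) :: r2) (k + 1) ((0 : Int), (0 : Int))).1)) ++ ['%', 's'])
          (List.map (fun k : Nat => (k : Int)) (List.range r2.length)))
        = ((interParts s0.toList ((p, y) :: r2)).map (· ++ ['%', 's'])).flatten := by
      rw [flatMap_eq_flatten_map, List.map_map]
      congr 1
      rw [← interParts_eq_range s0.toList ((0 : Int), (0 : Int)) (p, y) r2,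
          show ((p, y) :: r2).length - 1 = r2.length from by simp, List.map_map]
      refine List.map_congr_left ?_
      intro k _
      simp only [Function.comp_apply, PySem.List.pyGetD_natCast]
      rw [show ((k : Int) + 1) = (((k + 1 : Nat)) : Int) from by push_cast; ring,
          PySem.List.pyGetD_natCast]
    rw [hflat]
    rw [join_sep]

theorem dict_lookup (dct : List (String × String)) (h : (dct.map Prod.fst).Nodup)
    (k : String) (v : String) (hm : (k, v) ∈ dct) :
    PySem.Dict.get? (PySem.Dict.mk dct) k = some v := by
  induction dct with
  | nil => simp at hm
  | cons hd tl ih =>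
    obtain ⟨k', v'⟩ := hd
    simp only [List.map_cons, List.nodup_cons] at h
    rcases List.mem_cons.mp hm with he | hm'
    · cases he
      rw [PySem.Dict.get?_mk_cons]
      simp
    · have hk : (k' == k) = false := by
        simp only [beq_eq_false_iff_ne, ne_eq]
        intro heq
        apply h.1
        rw [heq]
        exact List.mem_map.mpr ⟨(k, v), hm', rfl⟩
      rw [PySem.Dict.get?_mk_cons, hk]
      simp only [Bool.false_eq_true, if_false]
      exact ih h.2 hm'

-- ===== VERDICT (by name: the statement is the Claim_ definition above) =====
theorem get_infos_spec : Claim_equal_get_infos := by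
  intro dct _ hpre
  unfold Spec_get_infos get_infos get_infos_alt
  refine PySem.List.foldl_congr_mem dct _ _ ([], []) ?_
  intro acc e he
  have := dict_lookup dct hpre e.1 e.2 (by simpa using he)
  simp only [this, Option.getD_some, parse_eq]
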